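-- pv_equiv track=rewrite | github.com/mounika0701/CS580_project | problem2/problem2.py | evaluate_k_line_join_query
-- ===== SOURCE A (Python) =====
-- from collections import defaultdict
--
-- def hash_join(Ra, Rb):
--     hash_map = defaultdict(list)
--     for b in Rb:
--         hash_map[b[0]].append(b)
--     result = []
--     for a in Ra:
--         if a[1] in hash_map:
--             for b in hash_map[a[1]]:
--                 result.append(a + b[1:])
--     return result
--
-- def evaluate_k_line_join_query(query, relations):
--     S = None
--     for relation in query:
--         projection = [(tuple_[i], tuple_[i+1]) for tuple_ in relations[relation] for i in range(len(tuple_)-1)]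
--         if S is None:
--             S = projection
--         else:
--             S = hash_join(S, projection)
--     return S
-- ===== SOURCE B (Python) =====
-- def evaluate_k_line_join_query(query, relations):
--     # project each relation to adjacent pairs up front, then left-fold a
--     # recursive-style nested-loop join over the list of projections (no hash map)
--     def edges(rel):
--         return [p for t in rel for p in zip(t, t[1:])]
--
--     def join(rows, pairs):
--         out = []
--         for a in rows:
--             for (x, y) in pairs:
--                 if a[1] == x:
--                     out.append(a + (y,))
--         return out
--
--     projs = [edges(relations[r]) for r in query]
--     S = projs[0]
--     for p in projs[1:]:
--         S = join(S, p)
--     return S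
-- ===== Notes on version B (the rewrite author's own statement) =====
-- stated objective: simpler
-- what changed: B precomputes all adjacent-pair projections via zip (no index arithmetic) into a list of pairs, then folds a hash-free nested-loop join (explicit outer/inner loops) over that list, replacing A's per-step defaultdict index build-and-probe; Pre_ excludes the empty query, where A returns None (not a list), and queries naming an absent relation, where A raises KeyError.
-- outside the precondition, e.g. on evaluate_k_line_join_query([], {}): A returns None, B raises IndexError
import Mathlib
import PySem

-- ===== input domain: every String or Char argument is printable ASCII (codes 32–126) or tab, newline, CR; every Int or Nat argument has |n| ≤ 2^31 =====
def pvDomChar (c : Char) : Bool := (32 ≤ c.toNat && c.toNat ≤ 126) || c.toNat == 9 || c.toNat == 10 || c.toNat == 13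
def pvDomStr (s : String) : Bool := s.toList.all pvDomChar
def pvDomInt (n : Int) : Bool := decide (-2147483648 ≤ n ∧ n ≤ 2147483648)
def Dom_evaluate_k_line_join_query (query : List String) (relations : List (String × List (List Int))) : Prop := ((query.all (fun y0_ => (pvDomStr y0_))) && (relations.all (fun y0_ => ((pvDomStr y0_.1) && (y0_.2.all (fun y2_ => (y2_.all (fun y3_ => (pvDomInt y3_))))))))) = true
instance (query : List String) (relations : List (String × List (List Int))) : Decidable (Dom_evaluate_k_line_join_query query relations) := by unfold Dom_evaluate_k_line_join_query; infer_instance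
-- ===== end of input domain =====

-- B projects every relation to a list of adjacent PAIRS up front (via zip, no index arithmetic) and then
-- folds a plain nested-loop join over that list, with no hash map; simpler, output identical on all inputs
-- where the Python A returns a list.

-- ===== PORT A =====
-- inner comprehension of A's outer loop: [(t[i], t[i+1]) for t in rel for i in range(len(t)-1)]
-- (indices i, i+1 are in range for every i of the range, so pyGetD's default is never used)
def pvProjection (rel : List (List Int)) : List (List Int) :=
  rel.flatMap (fun t =>
    (PySem.List.pyRange 0 ((t.length : Int) - 1) 1).map
      (fun i => [PySem.List.pyGetD t i 0, PySem.List.pyGetD t (i + 1) 0]))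

-- hash_join(Ra, Rb): build defaultdict(list) index of Rb by b[0], then probe with a[1].
-- a[1]/b[0] are in range on every reachable state (rows have length ≥ 2); pyGetD's default is never used.
def pvHashJoin (Ra Rb : List (List Int)) : List (List Int) :=
  let hm := Rb.foldl (fun d b => d.modify (PySem.List.pyGetD b 0 0) [] (· ++ [b])) (PySem.Dict.mk [])
  Ra.foldl (fun result a =>
    if hm.contains (PySem.List.pyGetD a 1 0) then
      (hm.getD (PySem.List.pyGetD a 1 0) []).foldl
        (fun r b => r ++ [a ++ PySem.List.slice b (some 1) none]) result
    else result) []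

-- S is None until the first iteration; Python returns None on an empty query and raises KeyError on a
-- missing relation name — both excluded by Pre_, so .getD below is never the returned value on Pre_.
def evaluate_k_line_join_query (query : List String) (relations : List (String × List (List Int))) : List (List Int) :=
  (query.foldl (fun S relation =>
      let projection := pvProjection ((PySem.Dict.mk relations).getD relation [])
      match S with
      | none => some projection
      | some s => some (pvHashJoin s projection)) none).getD []

-- ===== PORT B =====
-- edges(rel) = [p for t in rel for p in zip(t, t[1:])]
def pvEdges (rel : List (List Int)) : List (Int × Int) :=
  rel.flatMap (fun t => t.zip (t.drop 1))

-- inner 'for (x, y) in pairs' loop of join, for one fixed row a (a[1] is in range on every reachable row)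
def pvInner (a : List Int) (pairs : List (Int × Int)) : List (List Int) :=
  match pairs with
  | [] => []
  | (x, y) :: rest =>
      if PySem.List.pyGetD a 1 0 == x then (a ++ [y]) :: pvInner a rest else pvInner a rest

-- join(rows, pairs): outer loop over rows, concatenating each row's inner results
def pvJoin (rows : List (List Int)) (pairs : List (Int × Int)) : List (List Int) :=
  match rows with
  | [] => []
  | a :: rest => pvInner a pairs ++ pvJoin rest pairs

-- projs[0] raises IndexError on an empty query (excluded by Pre_); the [] arm is unreachable on Pre_
def evaluate_k_line_join_query_alt (query : List String) (relations : List (String × List (List Int))) : List (List Int) :=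
  let projs := query.map (fun r => pvEdges ((PySem.Dict.mk relations).getD r []))
  match projs with
  | [] => []
  | p :: rest => rest.foldl pvJoin (p.map (fun e => [e.1, e.2]))

-- ===== PRECONDITION & SPEC =====
-- Pre_ excludes exactly where Python A raises / returns no list: an empty query (A returns None) and a
-- query naming a relation absent from the dict (KeyError).
def Pre_evaluate_k_line_join_query (query : List String) (relations : List (String × List (List Int))) : Prop :=
  query ≠ [] ∧ ∀ r ∈ query, r ∈ relations.map Prod.fst
instance (query : List String) (relations : List (String × List (List Int))) : Decidable (Pre_evaluate_k_line_join_query query relations) := by unfold Pre_evaluate_k_line_join_query; infer_instance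

def pvWitness_evaluate_k_line_join_query : List String × (List (String × List (List Int))) :=
  (["R", "R"], [("R", [[1, 2, 3], [2, 5]])])

def Spec_evaluate_k_line_join_query (query : List String) (relations : List (String × List (List Int))) (out : List (List Int)) : Prop := out = evaluate_k_line_join_query_alt query relations
instance (query : List String) (relations : List (String × List (List Int))) (out : List (List Int)) : Decidable (Spec_evaluate_k_line_join_query query relations out) := by unfold Spec_evaluate_k_line_join_query; infer_instance

-- ===== CLAIM (what is proved, stated in full; the proofs are below) =====
def Claim_equal_evaluate_k_line_join_query : Prop := ∀ (query : List String) (relations : List (String × List (List Int))), Dom_evaluate_k_line_join_query query relations → Pre_evaluate_k_line_join_query query relations → Spec_evaluate_k_line_join_query query relations (evaluate_k_line_join_query query relations)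

-- ===== LEMMAS AND PROOFS =====

-- proof-side intermediate form of the join: flatMap/filterMap comprehension over row lists
def pvScanJoin (Ra Rb : List (List Int)) : List (List Int) :=
  Ra.flatMap (fun a =>
    Rb.filterMap (fun b =>
      if PySem.List.pyGetD a 1 0 == PySem.List.pyGetD b 0 0 then
        some (a ++ PySem.List.slice b (some 1) none)
      else none))

lemma pvFilterMap_if (l : List (List Int)) (f : List Int → List Int) (p : List Int → Bool) :
    l.filterMap (fun b => if p b then some (f b) else none) = (l.filter p).map f := by
  induction l with
  | nil => rfl
  | cons x xs ih => by_cases h : p x <;> simp [h, ih]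

lemma pvHashJoin_eq_pvScanJoin (Ra Rb : List (List Int)) : pvHashJoin Ra Rb = pvScanJoin Ra Rb := by
  unfold pvHashJoin pvScanJoin
  have hfold : Rb.foldl (fun d b => d.modify (PySem.List.pyGetD b 0 0) [] (· ++ [b])) (PySem.Dict.mk [])
      = (Rb.map (fun b => (PySem.List.pyGetD b 0 0, b))).foldl
          (fun d p => d.modify p.1 [] (fun x => x ++ [p.2])) (PySem.Dict.mk []) := by
    rw [List.foldl_map]
  have hgetD : ∀ c, (Rb.foldl (fun d b => d.modify (PySem.List.pyGetD b 0 0) [] (· ++ [b]))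
        (PySem.Dict.mk [])).getD c []
      = Rb.filter (fun b => PySem.List.pyGetD b 0 0 == c) := by
    intro c
    rw [hfold, PySem.Dict.getD_foldl_modify_append]
    simp only [List.filter_map, List.map_map, Function.comp_def]
    have : (PySem.Dict.mk ([] : List (Int × List (List Int)))).getD c [] = [] := rfl
    simp [this]
  have hcont : ∀ c, (Rb.foldl (fun d b => d.modify (PySem.List.pyGetD b 0 0) [] (· ++ [b]))
        (PySem.Dict.mk [])).contains c
      = decide (c ∈ Rb.map (fun b => PySem.List.pyGetD b 0 0)) := by
    intro c
    rw [PySem.Dict.contains_eq_decide_mem_keys,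
        PySem.Dict.keys_foldl_modify_key Rb (fun b => PySem.List.pyGetD b 0 0) []
          (fun _ b => (· ++ [b])) (PySem.Dict.mk [])]
    simp [PySem.Set.update_nil_left, PySem.Set.mem_ofList]
  simp only [hgetD, hcont, PySem.List.foldl_append_singleton_eq_map]
  have hstep : (fun (result : List (List Int)) a =>
        if decide (PySem.List.pyGetD a 1 0 ∈ Rb.map (fun b => PySem.List.pyGetD b 0 0)) = true then
          result ++ (Rb.filter (fun b => PySem.List.pyGetD b 0 0 == PySem.List.pyGetD a 1 0)).map
            (fun b => a ++ PySem.List.slice b (some 1) none)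
        else result)
      = fun result a => result ++
          (if decide (PySem.List.pyGetD a 1 0 ∈ Rb.map (fun b => PySem.List.pyGetD b 0 0)) = true then
            (Rb.filter (fun b => PySem.List.pyGetD b 0 0 == PySem.List.pyGetD a 1 0)).map
              (fun b => a ++ PySem.List.slice b (some 1) none)
          else []) := by
    funext result a; split <;> simp
  rw [hstep, PySem.List.foldl_append_eq_flatMap, List.nil_append]
  congr 1
  funext a
  rw [pvFilterMap_if]
  by_cases h : PySem.List.pyGetD a 1 0 ∈ Rb.map (fun b => PySem.List.pyGetD b 0 0)
  · simp only [h, decide_true, if_true]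
    congr 1
    apply List.filter_congr
    intro b _
    simp [eq_comm]
  · have hnil : Rb.filter (fun b => PySem.List.pyGetD a 1 0 == PySem.List.pyGetD b 0 0) = [] := by
      rw [List.filter_eq_nil_iff]
      intro b hb
      simp only [beq_iff_eq]
      intro e
      exact absurd (List.mem_map.mpr ⟨b, hb, e.symm⟩) h
    simp [h, hnil]

-- A's index-range projection of one tuple equals B's zip projection, rendered as rows
lemma pvProj_tuple (t : List Int) :
    (PySem.List.pyRange 0 ((t.length : Int) - 1) 1).map
      (fun i => [PySem.List.pyGetD t i 0, PySem.List.pyGetD t (i + 1) 0])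
    = (t.zip (t.drop 1)).map (fun e => [e.1, e.2]) := by
  rcases t with _ | ⟨x, rest⟩
  · simp [PySem.List.pyRange_one_eq_nil]
  · have hlen : ((x :: rest).length : Int) - 1 = (rest.length : Int) := by
      simp
    rw [hlen, PySem.List.pyRange_zero_natCast]
    rw [List.map_map]
    apply List.ext_getElem
    · simp [List.length_zip]
    · intro j h1 h2
      simp only [List.getElem_map, List.getElem_range, Function.comp_apply,
        List.getElem_zip] at *
      have hj : j < rest.length := by simpa using h1
      have g1 : PySem.List.pyGetD (x :: rest) ((j : Int)) 0 = (x :: rest).getD j 0 := by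
        exact_mod_cast PySem.List.pyGetD_natCast (x :: rest) j 0
      have g2 : PySem.List.pyGetD (x :: rest) ((j : Int) + 1) 0 = (x :: rest).getD (j + 1) 0 := by
        have := PySem.List.pyGetD_natCast (x :: rest) (j + 1) 0
        rw [← this]; norm_cast
      rw [g1, g2]
      have hd : (x :: rest).drop 1 = rest := rfl
      have hj1 : j < (x :: rest).length := by simp; omega
      have hj2 : j + 1 < (x :: rest).length := by simp; omega
      rw [List.getD_eq_getElem _ _ hj1, List.getD_eq_getElem _ _ hj2]
      simp

lemma pvProjection_eq (rel : List (List Int)) :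
    pvProjection rel = (pvEdges rel).map (fun e => [e.1, e.2]) := by
  unfold pvProjection pvEdges
  rw [List.map_flatMap]
  congr 1
  funext t
  exact pvProj_tuple t

lemma pvInner_eq (a : List Int) (E : List (Int × Int)) :
    pvInner a E = (E.map (fun e => [e.1, e.2])).filterMap (fun b =>
      if PySem.List.pyGetD a 1 0 == PySem.List.pyGetD b 0 0 then
        some (a ++ PySem.List.slice b (some 1) none)
      else none) := by
  induction E with
  | nil => rfl
  | cons e rest ih =>
    obtain ⟨x, y⟩ := e
    simp only [List.map_cons, List.filterMap_cons, pvInner]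
    have h0 : PySem.List.pyGetD [x, y] 0 0 = x := by
      simp [PySem.List.pyGetD, PySem.List.pyIdx?, PySem.List.pyGet?]
    have h1 : PySem.List.slice [x, y] (some 1) none = [y] := by
      rw [PySem.List.slice_from_one]
      rfl
    rw [h0, h1]
    by_cases h : (PySem.List.pyGetD a 1 0 == x) <;> simp [h, ih]

lemma pvScanJoin_map_eq_pvJoin (Ra : List (List Int)) (E : List (Int × Int)) :
    pvScanJoin Ra (E.map (fun e => [e.1, e.2])) = pvJoin Ra E := by
  induction Ra with
  | nil => rfl
  | cons a rest ih =>
    simp only [pvScanJoin, List.flatMap_cons] at ih ⊢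
    simp only [pvJoin]
    rw [ih, ← pvInner_eq a E]

lemma pvHashJoin_map_eq_pvJoin (Ra : List (List Int)) (E : List (Int × Int)) :
    pvHashJoin Ra (E.map (fun e => [e.1, e.2])) = pvJoin Ra E := by
  rw [pvHashJoin_eq_pvScanJoin, pvScanJoin_map_eq_pvJoin]

-- A's option-threaded fold, once started, is an ordinary fold
lemma pvOptFold (rs : List String) (relations : List (String × List (List Int))) (S : List (List Int)) :
    rs.foldl (fun S relation =>
      let projection := pvProjection ((PySem.Dict.mk relations).getD relation [])
      match S with
      | none => some projection
      | some s => some (pvHashJoin s projection)) (some S)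
    = some (rs.foldl (fun s relation =>
        pvHashJoin s (pvProjection ((PySem.Dict.mk relations).getD relation []))) S) := by
  induction rs generalizing S with
  | nil => rfl
  | cons r rest ih => simp only [List.foldl_cons]; exact ih _

-- ===== VERDICT (by name: the statement is the Claim_ definition above) =====
theorem evaluate_k_line_join_query_spec : Claim_equal_evaluate_k_line_join_query := by
  intro query relations _ hpre
  unfold Spec_evaluate_k_line_join_query evaluate_k_line_join_query evaluate_k_line_join_query_alt
  rcases query with _ | ⟨r, rs⟩
  · exact absurd rfl hpre.1
  · simp only [List.foldl_cons, List.map_cons]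
    rw [pvOptFold, Option.getD_some, List.foldl_map]
    rw [pvProjection_eq]
    congr 1
    funext s relation
    rw [pvProjection_eq, pvHashJoin_map_eq_pvJoin]
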